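-- pv_equiv track=rewrite | github.com/ramadlana/streamlit-starter | flask_app/routes/docs.py | _build_pagination
-- ===== SOURCE A (Python) =====
-- def _build_pagination(page, total_pages):
--     if total_pages <= 1:
--         return []
--
--     pages = [1, total_pages]
--     for candidate in range(page - 2, page + 3):
--         if 1 < candidate < total_pages:
--             pages.append(candidate)
--     ordered = sorted(set(pages))
--
--     tokens = []
--     prev = None
--     for item in ordered:
--         if prev is not None and item - prev > 1:
--             tokens.append(None)
--         tokens.append(item)
--         prev = item
--     return tokens
-- ===== SOURCE B (Python) =====
-- def _build_pagination(page, total_pages):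
--     if total_pages <= 1:
--         return []
--     lo = max(2, page - 2)
--     hi = min(total_pages - 1, page + 2)
--     tokens = [1]
--     if lo <= hi:
--         if lo - 1 > 1:
--             tokens.append(None)
--         tokens.extend(range(lo, hi + 1))
--         if total_pages - hi > 1:
--             tokens.append(None)
--     else:
--         if total_pages - 1 > 1:
--             tokens.append(None)
--     tokens.append(total_pages)
--     return tokens
-- ===== Notes on version B (the rewrite author's own statement) =====
-- stated objective: simpler
-- what changed: B computes the middle window bounds lo=max(2,page-2), hi=min(total_pages-1,page+2) directly and stitches the token list from arithmetic gap tests, instead of A's build-list / set-dedup / sort / scan-for-gaps pipeline.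
import Mathlib
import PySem

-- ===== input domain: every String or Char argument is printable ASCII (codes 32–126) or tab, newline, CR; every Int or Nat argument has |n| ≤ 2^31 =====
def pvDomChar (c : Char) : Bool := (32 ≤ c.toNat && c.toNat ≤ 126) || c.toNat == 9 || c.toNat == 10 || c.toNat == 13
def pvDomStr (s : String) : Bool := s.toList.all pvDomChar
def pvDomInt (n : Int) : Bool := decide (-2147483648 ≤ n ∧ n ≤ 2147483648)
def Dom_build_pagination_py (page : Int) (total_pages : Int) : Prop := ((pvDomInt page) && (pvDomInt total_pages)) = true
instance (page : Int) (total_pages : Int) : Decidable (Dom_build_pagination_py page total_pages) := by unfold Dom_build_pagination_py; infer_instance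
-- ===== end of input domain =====

-- B replaces A's build/set-dedup/sort/gap-scan pipeline by direct arithmetic on the window
-- bounds lo = max(2,page-2), hi = min(total_pages-1,page+2); objective: simpler.

-- ===== PORT A =====
-- gap-scan step of A's second loop (tokens, prev) — kept as a named helper
def pvGapStep (st : List (Option Int) × Option Int) (item : Int) : List (Option Int) × Option Int :=
  let tokens :=
    match st.2 with
    | some p => if item - p > 1 then st.1 ++ [none] else st.1
    | none => st.1
  (tokens ++ [some item], some item)

def build_pagination_py (page : Int) (total_pages : Int) : List (Option Int) :=
  if total_pages ≤ 1 then []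
  else
    let pages : List Int :=
      (PySem.List.pyRange (page - 2) (page + 3) 1).foldl
        (fun acc c => if 1 < c ∧ c < total_pages then acc ++ [c] else acc)
        [1, total_pages]
    let ordered := PySem.List.sorted (PySem.Set.ofList pages) (fun x => x) false
    (ordered.foldl pvGapStep ([], none)).1

-- ===== PORT B =====
def build_pagination_py_alt (page : Int) (total_pages : Int) : List (Option Int) :=
  if total_pages ≤ 1 then []
  else
    let lo := max 2 (page - 2)
    let hi := min (total_pages - 1) (page + 2)
    let tokens : List (Option Int) :=
      if lo ≤ hi then
        [some 1]
          ++ (if lo - 1 > 1 then [none] else [])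
          ++ (PySem.List.pyRange lo (hi + 1) 1).map some
          ++ (if total_pages - hi > 1 then [none] else [])
      else
        [some 1] ++ (if total_pages - 1 > 1 then [none] else [])
    tokens ++ [some total_pages]

-- ===== PRECONDITION & SPEC =====
def Spec_build_pagination_py (page : Int) (total_pages : Int) (out : List (Option Int)) : Prop := out = build_pagination_py_alt page total_pages
instance (page : Int) (total_pages : Int) (out : List (Option Int)) : Decidable (Spec_build_pagination_py page total_pages out) := by unfold Spec_build_pagination_py; infer_instance

-- ===== CLAIM (what is proved, stated in full; the proofs are below) =====
def Claim_equal_build_pagination_py : Prop := ∀ (page : Int) (total_pages : Int), Dom_build_pagination_py page total_pages → Spec_build_pagination_py page total_pages (build_pagination_py page total_pages)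

-- ===== LEMMAS AND PROOFS =====

-- Set.ofList is the identity on a Nodup list
theorem pv_foldl_add_nodup {α : Type} [BEq α] [LawfulBEq α] (xs s : List α)
    (h : ∀ x ∈ xs, x ∉ s) (hx : xs.Nodup) :
    xs.foldl PySem.Set.add s = s ++ xs := by
  induction xs generalizing s with
  | nil => simp
  | cons a t ih =>
    have ha : a ∉ s := h a (by simp)
    have hadd : PySem.Set.add s a = s ++ [a] := by
      simp [PySem.Set.add, PySem.Set.contains, ha]
    rw [List.foldl_cons, hadd, ih]
    · simp
    · intro x hxt
      simp only [List.mem_append, List.mem_singleton]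
      rintro (hs | rfl)
      · exact h x (by simp [hxt]) hs
      · exact (List.nodup_cons.mp hx).1 hxt
    · exact (List.nodup_cons.mp hx).2

theorem pv_ofList_nodup {α : Type} [BEq α] [LawfulBEq α] (xs : List α) (hx : xs.Nodup) :
    PySem.Set.ofList xs = xs := by
  have := pv_foldl_add_nodup xs [] (by simp) hx
  simpa [PySem.Set.ofList_eq_foldl] using this

-- filtering consecutive integers by the interval test gives the clipped range
theorem pv_filter_pyRange (tp : Int) : ∀ (n : Nat) (a : Int),
    (PySem.List.pyRange a (a + n) 1).filter (fun c => decide (1 < c ∧ c < tp))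
      = PySem.List.pyRange (max a 2) (min (a + n) tp) 1 := by
  intro n
  induction n with
  | zero =>
    intro a
    rw [PySem.List.pyRange_one_eq_nil (by omega)]
    rw [PySem.List.pyRange_one_eq_nil (by omega)]
    simp
  | succ m ih =>
    intro a
    have ha1 : a + (↑(m + 1) : Int) = (a + 1) + (↑m : Int) := by push_cast; ring
    rw [PySem.List.pyRange_one_cons (by omega)]
    by_cases hc : 1 < a ∧ a < tp
    · rw [List.filter_cons_of_pos (by simp [hc])]
      rw [ha1, ih (a + 1)]
      rw [show max (a + 1) 2 = a + 1 by omega, show max a 2 = a by omega]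
      rw [PySem.List.pyRange_one_cons (a := a)
        (b := min ((a + 1) + (↑m : Int)) tp) (by rw [lt_min_iff]; omega)]
    · rw [List.filter_cons_of_neg (by simp [hc])]
      rw [ha1, ih (a + 1)]
      rcases (not_and_or.mp hc) with h1 | h2
      · congr 1
        omega
      · rw [PySem.List.pyRange_one_eq_nil (by rw [min_le_iff]; omega),
            PySem.List.pyRange_one_eq_nil (by rw [min_le_iff]; omega)]

-- the gap scan over a consecutive run appends the run with no gap markers
theorem pv_gapscan_run : ∀ (n : Nat) (a : Int) (t : List (Option Int)),
    (PySem.List.pyRange a (a + n) 1).foldl pvGapStep (t, some (a - 1))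
      = (t ++ (PySem.List.pyRange a (a + n) 1).map some, some (a + n - 1)) := by
  intro n
  induction n with
  | zero =>
    intro a t
    rw [PySem.List.pyRange_one_eq_nil (by omega)]
    simp
  | succ m ih =>
    intro a t
    have ha1 : a + (↑(m + 1) : Int) = (a + 1) + (↑m : Int) := by push_cast; ring
    rw [PySem.List.pyRange_one_cons (by omega)]
    rw [List.foldl_cons]
    have hstep : pvGapStep (t, some (a - 1)) a = (t ++ [some a], some a) := by
      simp [pvGapStep]
    rw [hstep, ha1]
    have hrec := ih (a + 1) (t ++ [some a])
    rw [show (a + 1 - 1) = a from by ring] at hrec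
    rw [hrec]
    simp

-- main equivalence, unconditionally
theorem pv_main (page tp : Int) :
    build_pagination_py page tp = build_pagination_py_alt page tp := by
  by_cases htp : tp ≤ 1
  · simp [build_pagination_py, build_pagination_py_alt, htp]
  · rw [not_le] at htp
    set lo := max 2 (page - 2) with hlo
    set hi := min (tp - 1) (page + 2) with hhi
    have hlo2 : 2 ≤ lo := by omega
    have hhitp : hi ≤ tp - 1 := by omega
    have hW : (PySem.List.pyRange (page - 2) (page + 3) 1).filter
        (fun c => decide (1 < c ∧ c < tp)) = PySem.List.pyRange lo (hi + 1) 1 := by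
      have h5 := pv_filter_pyRange tp 5 (page - 2)
      rw [show (page - 2 + ((5:Nat):Int)) = page + 3 by push_cast; ring] at h5
      rw [h5]
      congr 1 <;> omega
    have hpages : (PySem.List.pyRange (page - 2) (page + 3) 1).foldl
        (fun acc c => if 1 < c ∧ c < tp then acc ++ [c] else acc) [1, tp]
        = [1, tp] ++ PySem.List.pyRange lo (hi + 1) 1 := by
      rw [PySem.List.foldl_append_ite_eq_filter, hW]
    have hWmem : ∀ x ∈ PySem.List.pyRange lo (hi + 1) 1, lo ≤ x ∧ x ≤ hi := by
      intro x hx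
      have := PySem.List.mem_pyRange_one.mp hx
      omega
    have hnodup : ([1, tp] ++ PySem.List.pyRange lo (hi + 1) 1).Nodup := by
      refine List.Nodup.append ?_ (PySem.List.nodup_pyRange_one _ _) ?_
      · simp
        omega
      · intro x hx hx2
        have hb := hWmem x hx2
        simp at hx
        rcases hx with rfl | rfl <;> omega
    have hsorted : PySem.List.sorted (PySem.Set.ofList
        ([1, tp] ++ PySem.List.pyRange lo (hi + 1) 1)) (fun x => x) false
        = 1 :: (PySem.List.pyRange lo (hi + 1) 1 ++ [tp]) := by
      rw [pv_ofList_nodup _ hnodup]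
      apply PySem.List.sorted_eq_of_perm_of_pairwise_lt
      · exact List.Perm.cons 1 List.perm_append_comm
      · simp only [List.pairwise_cons]
        constructor
        · intro y hy
          simp at hy
          rcases hy with hy | rfl <;> omega
        · rw [List.pairwise_append]
          refine ⟨PySem.List.pairwise_lt_pyRange_one _ _, by simp, ?_⟩
          intro x hx y hy
          simp at hy; subst hy
          have := hWmem x hx; omega
    rw [build_pagination_py, build_pagination_py_alt]
    rw [if_neg (by omega), if_neg (by omega)]
    simp only [← hlo, ← hhi]
    rw [hpages, hsorted]
    by_cases hle : lo ≤ hi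
    · -- nonempty window
      rw [if_pos hle]
      have hrun : PySem.List.pyRange lo (hi + 1) 1
          = lo :: PySem.List.pyRange (lo + 1) (hi + 1) 1 :=
        PySem.List.pyRange_one_cons (by omega)
      rw [hrun]
      simp only [List.cons_append, List.foldl_cons]
      have h1 : pvGapStep ([], none) 1 = ([some 1], some 1) := by
        simp [pvGapStep]
      rw [h1]
      have hstep2 : pvGapStep ([some 1], some 1) lo
          = ([some 1] ++ (if lo - 1 > 1 then [none] else []) ++ [some lo], some lo) := by
        by_cases hg : lo - 1 > 1 <;> simp [pvGapStep, hg]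
      rw [hstep2]
      have hrest := pv_gapscan_run (hi - lo).toNat (lo + 1)
        ([some 1] ++ (if lo - 1 > 1 then [none] else []) ++ [some lo])
      rw [show ((lo + 1) + (((hi - lo).toNat : Nat) : Int)) = hi + 1 by omega] at hrest
      rw [show (lo + 1 - 1) = lo by ring] at hrest
      rw [List.foldl_append, hrest]
      have hlast : pvGapStep
          ([some 1] ++ (if lo - 1 > 1 then [none] else []) ++ [some lo]
            ++ (PySem.List.pyRange (lo + 1) (hi + 1) 1).map some, some (hi + 1 - 1)) tp
          = ([some 1] ++ (if lo - 1 > 1 then [none] else []) ++ [some lo]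
            ++ (PySem.List.pyRange (lo + 1) (hi + 1) 1).map some
            ++ (if tp - hi > 1 then [none] else []) ++ [some tp], some tp) := by
        rw [show (hi + 1 - 1) = hi by ring]
        by_cases hg : tp - hi > 1 <;> simp [pvGapStep, hg]
      simp only [List.foldl_cons, List.foldl_nil]
      rw [hlast]
      simp
    · -- empty window
      rw [if_neg hle]
      rw [PySem.List.pyRange_one_eq_nil (by omega)]
      simp only [List.nil_append, List.foldl_cons, List.foldl_nil]
      have h1 : pvGapStep ([], none) 1 = ([some 1], some 1) := by
        simp [pvGapStep]
      rw [h1]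
      have h2 : pvGapStep ([some 1], some 1) tp
          = ([some 1] ++ (if tp - 1 > 1 then [none] else []) ++ [some tp], some tp) := by
        by_cases hg : tp - 1 > 1 <;> simp [pvGapStep, hg]
      rw [h2]

-- ===== VERDICT (by name: the statement is the Claim_ definition above) =====
theorem build_pagination_py_spec : Claim_equal_build_pagination_py := by
  intro page tp _
  unfold Spec_build_pagination_py
  exact pv_main page tp
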